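-- pv_equiv track=rewrite | github.com/dcialdella/adif-graficando-cositas | analizar_adi_grafico.py | analyze_mode_band
-- ===== SOURCE A (Python) =====
-- from collections import defaultdict, Counter, OrderedDict
--
-- def analyze_mode_band(qsos):
--     """
--     Analiza distribución por modo y banda de operación.
--
--     Modos comunes: SSB (fonía), FT8 (digital), FM, AM, CW, RTTY
--     Bandas HF: 160M, 80M, 40M, 20M, 15M, 10M
--     Bandas VHF/UHF: 2M, 70cm, 23cm
--
--     Args:
--         qsos (list): Lista de diccionarios de QSOs
--
--     Returns:
--         dict: {
--             'por_modo': {modo: cantidad},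
--             'por_banda': {banda: cantidad},
--             'modo_banda_combinado': {'modo - banda': cantidad}
--         }
--     """
--     mode_band = Counter()
--     modes = Counter()
--     bands = Counter()
--
--     for qso in qsos:
--         mode = qso.get('MODE', 'Desconocido')
--         band = qso.get('BAND', 'Desconocida')
--
--         modes[mode] += 1
--         bands[band] += 1
--         mode_band[f"{mode} - {band}"] += 1
--
--     return {
--         'por_modo': dict(modes.most_common()),
--         'por_banda': dict(bands.most_common()),
--         'modo_banda_combinado': dict(mode_band.most_common())
--     }
-- ===== SOURCE B (Python) =====
-- def analyze_mode_band(qsos):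
--     # One pass building a single (mode, band)-pair counter; the per-mode, per-band
--     # and combined-string tables are then derived from that smaller table.
--     pair_counts = {}
--     for qso in qsos:
--         key = (qso.get('MODE', 'Desconocido'), qso.get('BAND', 'Desconocida'))
--         pair_counts[key] = pair_counts.get(key, 0) + 1
--
--     modes = {}
--     bands = {}
--     combined = {}
--     for (mode, band), n in pair_counts.items():
--         modes[mode] = modes.get(mode, 0) + n
--         bands[band] = bands.get(band, 0) + n
--         key = f"{mode} - {band}"
--         combined[key] = combined.get(key, 0) + n
--
--     def by_count_desc(d):
--         return dict(sorted(d.items(), key=lambda kv: kv[1], reverse=True))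
--
--     return {
--         'por_modo': by_count_desc(modes),
--         'por_banda': by_count_desc(bands),
--         'modo_banda_combinado': by_count_desc(combined),
--     }
-- ===== Notes on version B (the rewrite author's own statement) =====
-- stated objective: alternative
-- what changed: B counts (mode, band) pairs in a single dict pass and then derives the per-mode, per-band and combined 'mode - band' tables from that smaller pair table, instead of A's three parallel Counters each updated on every QSO.
import Mathlib
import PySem

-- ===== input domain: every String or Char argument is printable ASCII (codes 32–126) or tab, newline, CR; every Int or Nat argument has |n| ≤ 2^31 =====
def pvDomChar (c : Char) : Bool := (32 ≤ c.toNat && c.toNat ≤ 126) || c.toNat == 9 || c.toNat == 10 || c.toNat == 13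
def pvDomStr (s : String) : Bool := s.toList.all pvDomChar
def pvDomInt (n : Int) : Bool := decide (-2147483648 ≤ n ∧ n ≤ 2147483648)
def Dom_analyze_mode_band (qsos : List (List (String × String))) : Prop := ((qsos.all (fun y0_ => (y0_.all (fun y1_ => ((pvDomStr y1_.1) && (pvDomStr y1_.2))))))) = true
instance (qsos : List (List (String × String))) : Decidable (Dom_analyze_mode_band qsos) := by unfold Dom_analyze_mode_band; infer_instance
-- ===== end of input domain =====

-- B replaces A's three parallel Counters over all QSOs by a single (mode, band)-pair
-- counter built in one pass, from which the three tables are derived (objective: alternative).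

-- qso.get(key, dflt) on the association-list dict (lookup = first match)
def qsoGet (qso : List (String × String)) (key dflt : String) : String :=
  (List.lookup key qso).getD dflt

-- Counter.most_common() = sorted(items, key=itemgetter(1), reverse=True); dict() of it keeps that order
def mostCommon (d : PySem.Dict String Int) : List (String × Int) :=
  PySem.List.sorted d.items (fun p => p.2) true

-- ===== PORT A =====
def analyze_mode_band (qsos : List (List (String × String))) : List (String × List (String × Int)) :=
  let st := qsos.foldl
    (fun (st : PySem.Dict String Int × PySem.Dict String Int × PySem.Dict String Int) qso =>
      (st.1.modify (qsoGet qso "MODE" "Desconocido" ++ " - " ++ qsoGet qso "BAND" "Desconocida") 0 (· + 1),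
       (st.2.1.modify (qsoGet qso "MODE" "Desconocido") 0 (· + 1),
        st.2.2.modify (qsoGet qso "BAND" "Desconocida") 0 (· + 1))))
    (PySem.Dict.empty, PySem.Dict.empty, PySem.Dict.empty)
  [("por_modo", mostCommon st.2.1),
   ("por_banda", mostCommon st.2.2),
   ("modo_banda_combinado", mostCommon st.1)]

-- ===== PORT B =====
def analyze_mode_band_alt (qsos : List (List (String × String))) : List (String × List (String × Int)) :=
  let pair_counts := qsos.foldl
    (fun (d : PySem.Dict (String × String) Int) qso =>
      d.modify (qsoGet qso "MODE" "Desconocido", qsoGet qso "BAND" "Desconocida") 0 (· + 1))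
    PySem.Dict.empty
  let st := pair_counts.items.foldl
    (fun (st : PySem.Dict String Int × PySem.Dict String Int × PySem.Dict String Int) it =>
      (st.1.modify it.1.1 0 (· + it.2),
       (st.2.1.modify it.1.2 0 (· + it.2),
        st.2.2.modify (it.1.1 ++ " - " ++ it.1.2) 0 (· + it.2))))
    (PySem.Dict.empty, PySem.Dict.empty, PySem.Dict.empty)
  [("por_modo", mostCommon st.1),
   ("por_banda", mostCommon st.2.1),
   ("modo_banda_combinado", mostCommon st.2.2)]

-- ===== PRECONDITION & SPEC =====
def Spec_analyze_mode_band (qsos : List (List (String × String))) (out : List (String × List (String × Int))) : Prop := out = analyze_mode_band_alt qsos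
instance (qsos : List (List (String × String))) (out : List (String × List (String × Int))) : Decidable (Spec_analyze_mode_band qsos out) := by unfold Spec_analyze_mode_band; infer_instance

-- ===== CLAIM (what is proved, stated in full; the proofs are below) =====
def Claim_equal_analyze_mode_band : Prop := ∀ (qsos : List (List (String × String))), Dom_analyze_mode_band qsos → Spec_analyze_mode_band qsos (analyze_mode_band qsos)

-- ===== LEMMAS AND PROOFS =====

-- a foldl of Set.add only appends: the start list is a prefix of the result
theorem foldl_add_prefix {α : Type} [BEq α] (l : List α) : ∀ (t : PySem.Set α),
    ∃ r, l.foldl PySem.Set.add t = t ++ r := by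
  induction l with
  | nil => intro t; exact ⟨[], by simp⟩
  | cons x l ih =>
    intro t
    show ∃ r, l.foldl PySem.Set.add (PySem.Set.add t x) = t ++ r
    rcases ih (PySem.Set.add t x) with ⟨r, hr⟩
    by_cases h : List.contains t x = true
    · exact ⟨r, by rw [hr]; simp [PySem.Set.add, PySem.Set.contains, h]⟩
    · refine ⟨x :: r, ?_⟩
      rw [hr]; simp [PySem.Set.add, PySem.Set.contains, h]

-- folding `add (f x)` over l equals folding it over the fresh distinct elements of l
theorem fold_add_map_dedup {α β : Type} [BEq α] [LawfulBEq α] [BEq β] [LawfulBEq β] (f : α → β) :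
    ∀ (l : List α) (t : PySem.Set α) (s : PySem.Set β), (∀ x ∈ t, f x ∈ s) →
      l.foldl (fun s x => PySem.Set.add s (f x)) s
        = ((l.foldl PySem.Set.add t).drop t.length).foldl (fun s x => PySem.Set.add s (f x)) s := by
  intro l
  induction l with
  | nil => intro t s h; simp
  | cons x l ih =>
    intro t s h
    show l.foldl (fun s x => PySem.Set.add s (f x)) (PySem.Set.add s (f x))
        = ((l.foldl PySem.Set.add (PySem.Set.add t x)).drop t.length).foldl
            (fun s x => PySem.Set.add s (f x)) s
    by_cases hx : List.contains t x = true
    · have hmem : x ∈ t := by simpa using hx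
      have hadd : PySem.Set.add t x = t := by simp [PySem.Set.add, PySem.Set.contains, hmem]
      have hs : PySem.Set.add s (f x) = s := by
        simp [PySem.Set.add, PySem.Set.contains, h x hmem]
      rw [hs, hadd, ih t s h]
    · have hnmem : ¬ x ∈ t := by simpa using hx
      have hadd : PySem.Set.add t x = t ++ [x] := by simp [PySem.Set.add, PySem.Set.contains, hnmem]
      have h' : ∀ y ∈ t ++ [x], f y ∈ PySem.Set.add s (f x) := by
        intro y hy
        rcases List.mem_append.1 hy with hy | hy
        · exact (PySem.Set.mem_add s (f x) (f y)).2 (Or.inl (h y hy))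
        · have : y = x := by simpa using hy
          subst this
          exact (PySem.Set.mem_add s (f y) (f y)).2 (Or.inr rfl)
      rw [hadd, ih (t ++ [x]) (PySem.Set.add s (f x)) h']
      rcases foldl_add_prefix l (t ++ [x]) with ⟨r, hr⟩
      rw [hr]
      have h1 : (t ++ [x] ++ r).drop t.length = x :: r := by
        simp [List.append_assoc]
      have h2 : (t ++ [x] ++ r).drop (t ++ [x]).length = r := by
        simp
      rw [h1, h2]
      rfl

-- mapping f commutes with first-occurrence dedup at the Set level
theorem ofList_map_ofList {α β : Type} [BEq α] [LawfulBEq α] [BEq β] [LawfulBEq β] (f : α → β) (l : List α) :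
    PySem.Set.ofList ((PySem.Set.ofList l).map f) = PySem.Set.ofList (l.map f) := by
  rw [PySem.Set.ofList_eq_foldl (l.map f), PySem.Set.ofList_eq_foldl ((PySem.Set.ofList l).map f)]
  rw [List.foldl_map, List.foldl_map]
  rw [fold_add_map_dedup f l [] [] (by simp)]
  simp [PySem.Set.ofList_eq_foldl]

-- value of the derivation fold: the dflt-0 lookup accumulates the matching weights
theorem getD_derive {κ κ' : Type} [BEq κ'] [LawfulBEq κ'] [DecidableEq κ'] (f : κ → κ') :
    ∀ (L : List (κ × Int)) (d : PySem.Dict κ' Int) (v : κ'),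
      (L.foldl (fun d p => d.modify (f p.1) 0 (· + p.2)) d).getD v 0
        = d.getD v 0 + ((L.filter (fun p => decide (f p.1 = v))).map (·.2)).sum := by
  intro L
  induction L with
  | nil => intro d v; simp
  | cons p L ih =>
    intro d v
    show (L.foldl (fun d p => d.modify (f p.1) 0 (· + p.2)) (d.modify (f p.1) 0 (· + p.2))).getD v 0 = _
    rw [ih]
    rw [PySem.Dict.getD_modify]
    by_cases h : f p.1 = v
    · simp [h]
      ring
    · have h' : ¬ (v = f p.1) := fun hh => h hh.symm
      simp [h, h']

-- a 0/1 indicator summed over a duplicate-free list is a membership test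
theorem sum_indicator {κ : Type} [DecidableEq κ] :
    ∀ (D : List κ) (x : κ), D.Nodup →
      ((D.map (fun k => if k = x then (1:Int) else 0)).sum = if x ∈ D then (1:Int) else 0) := by
  intro D
  induction D with
  | nil => intro x _; simp
  | cons y D ih =>
    intro x hnd
    rcases List.nodup_cons.1 hnd with ⟨hy, hnd'⟩
    by_cases h : y = x
    · subst h
      simp [ih y hnd', hy]
    · have h' : ¬ (x = y) := fun hh => h hh.symm
      simp [h, h', ih x hnd']

-- summing the multiplicities of the distinct keys mapped into v counts v in the image
theorem sum_counts_filter {κ κ' : Type} [BEq κ] [LawfulBEq κ] [DecidableEq κ] [BEq κ'] [LawfulBEq κ'] [DecidableEq κ'] (f : κ → κ') (v : κ') :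
    ∀ (l : List κ) (D : List κ), D.Nodup → (∀ x ∈ l, x ∈ D) →
      ((D.filter (fun k => decide (f k = v))).map (fun k => (l.count k : Int))).sum
        = ((l.map f).count v : Int) := by
  intro l
  induction l with
  | nil => intro D _ _; simp
  | cons x l ih =>
    intro D hnd hmem
    have hxD : x ∈ D := hmem x (List.mem_cons_self)
    have hsplit : ∀ k, ((x :: l).count k : Int) = (l.count k : Int) + (if k = x then (1:Int) else 0) := by
      intro k
      by_cases h : k = x
      · simp [List.count_cons, h]
      · have h' : ¬ (x = k) := fun hh => h hh.symm
        simp [List.count_cons, h, h']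
    have hind : ((D.filter (fun k => decide (f k = v))).map (fun k => (if k = x then (1:Int) else 0))).sum
        = if f x = v then (1:Int) else 0 := by
      rw [sum_indicator (D.filter (fun k => decide (f k = v))) x (hnd.filter _)]
      by_cases h : f x = v
      · simp [List.mem_filter, hxD, h]
      · simp [List.mem_filter, h]
    calc ((D.filter (fun k => decide (f k = v))).map (fun k => ((x :: l).count k : Int))).sum
        = ((D.filter (fun k => decide (f k = v))).map
            (fun k => (l.count k : Int) + (if k = x then (1:Int) else 0))).sum := by
          rw [List.map_congr_left (fun k _ => hsplit k)]
      _ = ((l.map f).count v : Int) + (if f x = v then (1:Int) else 0) := by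
          rw [List.sum_map_add, ih D hnd (fun y hy => hmem y (List.mem_cons_of_mem x hy)), hind]
      _ = (((x :: l).map f).count v : Int) := by
          by_cases h : f x = v
          · simp [List.count_cons, h]
          · have h' : ¬ (v = f x) := fun hh => h hh.symm
            simp [List.count_cons, h, h']

-- CORE: deriving a counter from the items of `counter l` through a key map f gives `counter (l.map f)`
theorem derive_counter {κ κ' : Type} [BEq κ] [LawfulBEq κ] [DecidableEq κ] [BEq κ'] [LawfulBEq κ'] [DecidableEq κ'] (f : κ → κ') (l : List κ) :
    (PySem.Dict.counter l).items.foldl (fun d p => d.modify (f p.1) 0 (· + p.2)) PySem.Dict.empty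
      = PySem.Dict.counter (l.map f) := by
  have hL : (PySem.Dict.counter l).items
      = (PySem.Set.ofList l).map (fun k => (k, (l.count k : Int))) := PySem.Dict.items_counter l
  have hkeys : ((PySem.Dict.counter l).items.foldl
        (fun d p => d.modify (f p.1) 0 (· + p.2)) PySem.Dict.empty).keys
      = PySem.Set.ofList (l.map f) := by
    have hk := PySem.Dict.keys_foldl_modify_key (PySem.Dict.counter l).items
      (fun p => f p.1) 0 (fun _ p => (· + p.2)) PySem.Dict.empty
    rw [hk]
    have hke : (PySem.Dict.empty : PySem.Dict κ' Int).keys = ([] : List κ') := by simp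
    rw [hke]
    have hupd : PySem.Set.update ([] : List κ') ((PySem.Dict.counter l).items.map (fun p => f p.1))
        = PySem.Set.ofList ((PySem.Dict.counter l).items.map (fun p => f p.1)) := rfl
    rw [hupd, hL]
    have : ((PySem.Set.ofList l).map (fun k => (k, (l.count k : Int)))).map (fun p => f p.1)
        = (PySem.Set.ofList l).map f := by simp [List.map_map, Function.comp]
    rw [this, ofList_map_ofList]
  have hnd1 : ((PySem.Dict.counter l).items.foldl
        (fun d p => d.modify (f p.1) 0 (· + p.2)) PySem.Dict.empty).keys.Nodup := by
    rw [hkeys]; exact PySem.Set.nodup_ofList _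
  have hv : ∀ v, ((PySem.Dict.counter l).items.foldl
        (fun d p => d.modify (f p.1) 0 (· + p.2)) PySem.Dict.empty).getD v 0
      = (PySem.Dict.counter (l.map f)).getD v 0 := by
    intro v
    rw [getD_derive f _ _ v, PySem.Dict.getD_counter]
    rw [hL]
    have hfm : ((PySem.Set.ofList l).map (fun k => (k, (l.count k : Int)))).filter
          (fun p => decide (f p.1 = v))
        = ((PySem.Set.ofList l).filter (fun k => decide (f k = v))).map
            (fun k => (k, (l.count k : Int))) := by
      rw [List.filter_map]
      rfl
    rw [hfm, List.map_map]
    have : ((fun (p : κ × Int) => p.2) ∘ (fun k => (k, (l.count k : Int))))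
        = fun k => (l.count k : Int) := rfl
    rw [this]
    rw [sum_counts_filter f v l (PySem.Set.ofList l) (PySem.Set.nodup_ofList l)
        (fun x hx => (PySem.Set.mem_ofList l x).2 hx)]
    simp
  apply PySem.Dict.ext
  rw [PySem.Dict.items_eq_map_keys _ hnd1 0,
      PySem.Dict.items_eq_map_keys (PySem.Dict.counter (l.map f))
        (PySem.Dict.nodup_keys_counter _) 0,
      hkeys, PySem.Dict.keys_counter]
  exact List.map_congr_left (fun k _ => by rw [hv k])

-- the two ports agree on every input
theorem ports_eq (qsos : List (List (String × String))) :
    analyze_mode_band qsos = analyze_mode_band_alt qsos := by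
  have hA : qsos.foldl
      (fun (st : PySem.Dict String Int × PySem.Dict String Int × PySem.Dict String Int) qso =>
        (st.1.modify (qsoGet qso "MODE" "Desconocido" ++ " - " ++ qsoGet qso "BAND" "Desconocida") 0 (· + 1),
         (st.2.1.modify (qsoGet qso "MODE" "Desconocido") 0 (· + 1),
          st.2.2.modify (qsoGet qso "BAND" "Desconocida") 0 (· + 1))))
      (PySem.Dict.empty, PySem.Dict.empty, PySem.Dict.empty)
      = (PySem.Dict.counter (qsos.map (fun qso => qsoGet qso "MODE" "Desconocido" ++ " - " ++ qsoGet qso "BAND" "Desconocida")),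
         PySem.Dict.counter (qsos.map (fun qso => qsoGet qso "MODE" "Desconocido")),
         PySem.Dict.counter (qsos.map (fun qso => qsoGet qso "BAND" "Desconocida"))) := by
    rw [PySem.List.foldl_prod_mk
        (f := fun (d : PySem.Dict String Int) qso =>
          d.modify (qsoGet qso "MODE" "Desconocido" ++ " - " ++ qsoGet qso "BAND" "Desconocida") 0 (· + 1))
        (g := fun (st : PySem.Dict String Int × PySem.Dict String Int) qso =>
          (st.1.modify (qsoGet qso "MODE" "Desconocido") 0 (· + 1),
           st.2.modify (qsoGet qso "BAND" "Desconocida") 0 (· + 1)))]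
    rw [PySem.List.foldl_prod_mk
        (f := fun (d : PySem.Dict String Int) qso => d.modify (qsoGet qso "MODE" "Desconocido") 0 (· + 1))
        (g := fun (d : PySem.Dict String Int) qso => d.modify (qsoGet qso "BAND" "Desconocida") 0 (· + 1))]
    refine congrArg₂ Prod.mk ?_ (congrArg₂ Prod.mk ?_ ?_) <;>
      rw [PySem.Dict.counter_eq_foldl, List.foldl_map]
  have hP : qsos.foldl
      (fun (d : PySem.Dict (String × String) Int) qso =>
        d.modify (qsoGet qso "MODE" "Desconocido", qsoGet qso "BAND" "Desconocida") 0 (· + 1))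
      PySem.Dict.empty
      = PySem.Dict.counter (qsos.map (fun qso => (qsoGet qso "MODE" "Desconocido", qsoGet qso "BAND" "Desconocida"))) := by
    rw [PySem.Dict.counter_eq_foldl, List.foldl_map]
  have hB : (PySem.Dict.counter (qsos.map (fun qso => (qsoGet qso "MODE" "Desconocido", qsoGet qso "BAND" "Desconocida")))).items.foldl
      (fun (st : PySem.Dict String Int × PySem.Dict String Int × PySem.Dict String Int) it =>
        (st.1.modify it.1.1 0 (· + it.2),
         (st.2.1.modify it.1.2 0 (· + it.2),
          st.2.2.modify (it.1.1 ++ " - " ++ it.1.2) 0 (· + it.2))))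
      (PySem.Dict.empty, PySem.Dict.empty, PySem.Dict.empty)
      = (PySem.Dict.counter (qsos.map (fun qso => qsoGet qso "MODE" "Desconocido")),
         (PySem.Dict.counter (qsos.map (fun qso => qsoGet qso "BAND" "Desconocida")),
          PySem.Dict.counter (qsos.map (fun qso => qsoGet qso "MODE" "Desconocido" ++ " - " ++ qsoGet qso "BAND" "Desconocida")))) := by
    rw [PySem.List.foldl_prod_mk
        (f := fun (d : PySem.Dict String Int) (it : (String × String) × Int) => d.modify it.1.1 0 (· + it.2))
        (g := fun (st : PySem.Dict String Int × PySem.Dict String Int) (it : (String × String) × Int) =>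
          (st.1.modify it.1.2 0 (· + it.2), st.2.modify (it.1.1 ++ " - " ++ it.1.2) 0 (· + it.2)))]
    rw [PySem.List.foldl_prod_mk
        (f := fun (d : PySem.Dict String Int) (it : (String × String) × Int) => d.modify it.1.2 0 (· + it.2))
        (g := fun (d : PySem.Dict String Int) (it : (String × String) × Int) => d.modify (it.1.1 ++ " - " ++ it.1.2) 0 (· + it.2))]
    refine congrArg₂ Prod.mk ?_ (congrArg₂ Prod.mk ?_ ?_)
    · rw [derive_counter (f := fun mb : String × String => mb.1) (qsos.map (fun qso => (qsoGet qso "MODE" "Desconocido", qsoGet qso "BAND" "Desconocida")))]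
      rw [List.map_map]; rfl
    · rw [derive_counter (f := fun mb : String × String => mb.2) (qsos.map (fun qso => (qsoGet qso "MODE" "Desconocido", qsoGet qso "BAND" "Desconocida")))]
      rw [List.map_map]; rfl
    · rw [derive_counter (f := fun mb : String × String => mb.1 ++ " - " ++ mb.2) (qsos.map (fun qso => (qsoGet qso "MODE" "Desconocido", qsoGet qso "BAND" "Desconocida")))]
      rw [List.map_map]; rfl
  show [("por_modo", mostCommon (qsos.foldl
      (fun (st : PySem.Dict String Int × PySem.Dict String Int × PySem.Dict String Int) qso =>
        (st.1.modify (qsoGet qso "MODE" "Desconocido" ++ " - " ++ qsoGet qso "BAND" "Desconocida") 0 (· + 1),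
         (st.2.1.modify (qsoGet qso "MODE" "Desconocido") 0 (· + 1),
          st.2.2.modify (qsoGet qso "BAND" "Desconocida") 0 (· + 1))))
      (PySem.Dict.empty, PySem.Dict.empty, PySem.Dict.empty)).2.1), _, _] = _
  rw [hA]
  show _ = [("por_modo", mostCommon ((qsos.foldl
      (fun (d : PySem.Dict (String × String) Int) qso =>
        d.modify (qsoGet qso "MODE" "Desconocido", qsoGet qso "BAND" "Desconocida") 0 (· + 1))
      PySem.Dict.empty).items.foldl
      (fun (st : PySem.Dict String Int × PySem.Dict String Int × PySem.Dict String Int) it =>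
        (st.1.modify it.1.1 0 (· + it.2),
         (st.2.1.modify it.1.2 0 (· + it.2),
          st.2.2.modify (it.1.1 ++ " - " ++ it.1.2) 0 (· + it.2))))
      (PySem.Dict.empty, PySem.Dict.empty, PySem.Dict.empty)).1), _, _]
  rw [hP, hB]

-- ===== VERDICT (by name: the statement is the Claim_ definition above) =====
theorem analyze_mode_band_spec : Claim_equal_analyze_mode_band := by
  intro qsos _
  exact ports_eq qsos
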